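-- pv_equiv track=rewrite | github.com/datahub-project/datahub | datahub-executor/scripts/streamlit_explorer/common/shared.py | _extract_hash_from_run_id
-- ===== SOURCE A (Python) =====
-- def _extract_hash_from_run_id(run_id: str) -> str:
--     """Extract the hash portion from a run ID.
--
--     Supports formats used by inference_v2 and anomaly comparison:
--     - {model_key}__{base_id}__{hash}
--     - auto_v2_{hash}
--     - auto_v2_eval__auto_v2_{hash}
--     - auto_v2::{prefixed} (anomaly comparison prefixed key)
--
--     Returns:
--         Hash portion (up to 8 characters), or empty string if format doesn't match.
--     """
--     if not run_id:
--         return ""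
--     # Anomaly comparison uses prefixed keys: auto_v2::auto_v2_{hash}
--     if run_id.startswith("auto_v2::"):
--         return _extract_hash_from_run_id(run_id[len("auto_v2::") :])
--
--     # Format: auto_v2_eval__auto_v2_{hash}
--     if run_id.startswith("auto_v2_eval__"):
--         remaining = run_id[len("auto_v2_eval__") :]
--         if remaining.startswith("auto_v2_"):
--             hash_part = remaining[len("auto_v2_") :]
--             return hash_part[:8] if len(hash_part) >= 8 else hash_part
--         return remaining[:8] if len(remaining) >= 8 else remaining
--
--     if run_id.startswith("auto_v2_"):
--         hash_part = run_id[len("auto_v2_") :]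
--         return hash_part[:8] if len(hash_part) >= 8 else hash_part
--
--     parts = run_id.split("__")
--     if len(parts) >= 3:
--         return parts[-1]
--     return ""
-- ===== SOURCE B (Python) =====
-- def _extract_hash_from_run_id(run_id: str) -> str:
--     # Iteratively strip "auto_v2::" prefixes, then dispatch once on the remainder.
--     while run_id.startswith("auto_v2::"):
--         run_id = run_id[9:]
--     if not run_id:
--         return ""
--     if run_id.startswith("auto_v2_eval__"):
--         rest = run_id[14:]
--         return rest[8:16] if rest.startswith("auto_v2_") else rest[:8]
--     if run_id.startswith("auto_v2_"):
--         return run_id[8:16]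
--     parts = run_id.split("__")
--     return parts[-1] if len(parts) >= 3 else ""
-- ===== Notes on version B (the rewrite author's own statement) =====
-- stated objective: simpler
-- what changed: Replaces the self-recursive handling of the anomaly-comparison prefix with an iterative strip loop done once up front, and replaces each length-conditional 8-character truncation with a single direct slice.
import Mathlib
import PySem

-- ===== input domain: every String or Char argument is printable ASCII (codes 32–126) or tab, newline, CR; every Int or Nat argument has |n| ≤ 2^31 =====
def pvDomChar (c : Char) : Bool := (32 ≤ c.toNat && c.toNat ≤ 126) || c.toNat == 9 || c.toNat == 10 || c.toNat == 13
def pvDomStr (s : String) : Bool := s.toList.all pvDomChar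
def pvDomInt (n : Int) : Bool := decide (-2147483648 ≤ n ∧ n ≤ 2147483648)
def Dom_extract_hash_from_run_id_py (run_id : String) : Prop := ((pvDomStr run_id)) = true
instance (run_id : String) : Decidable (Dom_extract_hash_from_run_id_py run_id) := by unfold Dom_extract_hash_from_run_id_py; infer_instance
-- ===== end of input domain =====

-- B replaces A's self-recursion on the anomaly-comparison prefix by an up-front iterative strip
-- loop and each length-conditional 8-character truncation by one direct slice (simpler).

-- ===== PORT A =====
-- A, transliterated on the code-point list (self-recursive, exactly as the Python).
def pvAuxA (cs : List Char) : String :=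
  if cs = [] then ""
  else if PySem.Chars.startswith cs ("auto_v2::".toList) then
    pvAuxA (PySem.Chars.slice cs (some (9 : Int)) none)
  else if PySem.Chars.startswith cs ("auto_v2_eval__".toList) then
    let remaining := PySem.Chars.slice cs (some (14 : Int)) none
    if PySem.Chars.startswith remaining ("auto_v2_".toList) then
      let hash_part := PySem.Chars.slice remaining (some (8 : Int)) none
      if 8 ≤ PySem.Chars.len hash_part then
        String.ofList (PySem.Chars.slice hash_part none (some (8 : Int)))
      else String.ofList hash_part
    else if 8 ≤ PySem.Chars.len remaining then
      String.ofList (PySem.Chars.slice remaining none (some (8 : Int)))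
    else String.ofList remaining
  else if PySem.Chars.startswith cs ("auto_v2_".toList) then
    let hash_part := PySem.Chars.slice cs (some (8 : Int)) none
    if 8 ≤ PySem.Chars.len hash_part then
      String.ofList (PySem.Chars.slice hash_part none (some (8 : Int)))
    else String.ofList hash_part
  else
    let parts := (PySem.Chars.split? cs ("__".toList)).getD []
    if 3 ≤ parts.length then String.ofList (PySem.List.pyGetD parts (-1) []) else ""
  termination_by cs.length
  decreasing_by
    rename_i _ h
    have hp : ("auto_v2::".toList) <+: cs := (PySem.Chars.startswith_iff _ _).mp h
    have hlen : 9 ≤ cs.length := by have := hp.length_le; simpa using this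
    simp [pysem]
    omega

def extract_hash_from_run_id_py (run_id : String) : String := pvAuxA run_id.toList

-- ===== PORT B =====
-- B's strip loop: while run_id.startswith("auto_v2::"): run_id = run_id[9:]
def pvStripB (cs : List Char) : List Char :=
  if PySem.Chars.startswith cs ("auto_v2::".toList) then
    pvStripB (PySem.Chars.slice cs (some (9 : Int)) none)
  else cs
  termination_by cs.length
  decreasing_by
    rename_i h
    have hp : ("auto_v2::".toList) <+: cs := (PySem.Chars.startswith_iff _ _).mp h
    have hlen : 9 ≤ cs.length := by have := hp.length_le; simpa using this
    simp [pysem]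
    omega

-- B's single dispatch on the stripped remainder.
def pvBodyB (cs : List Char) : String :=
  if cs = [] then ""
  else if PySem.Chars.startswith cs ("auto_v2_eval__".toList) then
    let rest := PySem.Chars.slice cs (some (14 : Int)) none
    if PySem.Chars.startswith rest ("auto_v2_".toList) then
      String.ofList (PySem.Chars.slice rest (some (8 : Int)) (some (16 : Int)))
    else String.ofList (PySem.Chars.slice rest none (some (8 : Int)))
  else if PySem.Chars.startswith cs ("auto_v2_".toList) then
    String.ofList (PySem.Chars.slice cs (some (8 : Int)) (some (16 : Int)))
  else
    let parts := (PySem.Chars.split? cs ("__".toList)).getD []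
    if 3 ≤ parts.length then String.ofList (PySem.List.pyGetD parts (-1) []) else ""

def extract_hash_from_run_id_py_alt (run_id : String) : String :=
  pvBodyB (pvStripB run_id.toList)

-- ===== PRECONDITION & SPEC =====
def Spec_extract_hash_from_run_id_py (run_id : String) (out : String) : Prop := out = extract_hash_from_run_id_py_alt run_id
instance (run_id : String) (out : String) : Decidable (Spec_extract_hash_from_run_id_py run_id out) := by unfold Spec_extract_hash_from_run_id_py; infer_instance

-- ===== CLAIM (what is proved, stated in full; the proofs are below) =====
def Claim_equal_extract_hash_from_run_id_py : Prop := ∀ (run_id : String), Dom_extract_hash_from_run_id_py run_id → Spec_extract_hash_from_run_id_py run_id (extract_hash_from_run_id_py run_id)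

-- ===== LEMMAS AND PROOFS =====

lemma pv_strip_id (cs : List Char)
    (h : ¬ PySem.Chars.startswith cs ("auto_v2::".toList) = true) : pvStripB cs = cs := by
  rw [pvStripB.eq_def, if_neg h]

lemma pv_main (cs : List Char) : pvAuxA cs = pvBodyB (pvStripB cs) := by
  induction hn : cs.length using Nat.strong_induction_on generalizing cs with
  | _ n ih =>
  by_cases h : PySem.Chars.startswith cs ("auto_v2::".toList) = true
  · have hp : ("auto_v2::".toList) <+: cs := (PySem.Chars.startswith_iff _ _).mp h
    have hlen : 9 ≤ cs.length := by have := hp.length_le; simpa using this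
    have hnil : ¬ cs = [] := by intro hc; subst hc; simp at hlen
    rw [pvAuxA.eq_def, if_neg hnil, if_pos h, pvStripB.eq_def, if_pos h]
    exact ih _ (by subst hn; simp [pysem]; omega) _ rfl
  · rw [pv_strip_id cs h, pvAuxA.eq_def]
    by_cases hnil : cs = []
    · subst hnil; simp [pvBodyB]
    · rw [if_neg hnil, if_neg h]
      unfold pvBodyB
      rw [if_neg hnil]
      by_cases he : PySem.Chars.startswith cs ("auto_v2_eval__".toList) = true
      · rw [if_pos he, if_pos he]
        by_cases hr : PySem.Chars.startswith (PySem.Chars.slice cs (some (14:Int)) none) ("auto_v2_".toList) = true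
        · rw [if_pos hr, if_pos hr]
          simp [pysem]
          intro hlt
          rw [List.take_of_length_le (by simp [List.length_drop]; omega)]
        · rw [if_neg hr, if_neg hr]
          simp [pysem]
          intro hlt
          rw [List.take_of_length_le (by simp [List.length_drop]; omega)]
      · rw [if_neg he, if_neg he]
        by_cases ha : PySem.Chars.startswith cs ("auto_v2_".toList) = true
        · rw [if_pos ha, if_pos ha]
          simp [pysem]
          intro hlt
          rw [List.take_of_length_le (by simp [List.length_drop]; omega)]
        · rw [if_neg ha, if_neg ha]

-- ===== VERDICT (by name: the statement is the Claim_ definition above) =====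
theorem extract_hash_from_run_id_py_spec : Claim_equal_extract_hash_from_run_id_py := by
  intro run_id _
  unfold Spec_extract_hash_from_run_id_py extract_hash_from_run_id_py extract_hash_from_run_id_py_alt
  exact pv_main run_id.toList
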